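-- pv_equiv track=rewrite | github.com/007krcs/aria-ai | agents/web_implementer.py | _guess_entry_point
-- ===== SOURCE A (Python) =====
-- from typing import Any, Dict, List, Optional, Tuple
--
-- def _guess_entry_point(files_dict: Dict[str, str]) -> Optional[str]:
--     """Guess the main entry point from a files dict."""
--     for candidate in ("main.py", "app.py", "server.py", "index.py",
--                       "index.js", "app.js", "server.js", "index.ts"):
--         if candidate in files_dict:
--             return candidate
--     py_files = [f for f in files_dict if f.endswith(".py")]
--     if py_files:
--         return py_files[0]
--     js_files = [f for f in files_dict if f.endswith(".js")]
--     if js_files: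
--         return js_files[0]
--     return None
-- ===== SOURCE B (Python) =====
-- _CAND = ("main.py", "app.py", "server.py", "index.py",
--          "index.js", "app.js", "server.js", "index.ts")
--
-- def _rank(pos, name):
--     """Priority rank of a filename, or None if it can never be the entry point."""
--     if name in _CAND:
--         return (0, _CAND.index(name))
--     if name.endswith(".py"):
--         return (1, pos)
--     if name.endswith(".js"):
--         return (2, pos)
--     return None
--
-- def _guess_entry_point(files_dict):
--     """Argmin by rank: map every key to a totally ordered rank and keep the best."""
--     best = None  # (rank, name)
--     for pos, name in enumerate(files_dict):
--         r = _rank(pos, name)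
--         if r is not None and (best is None or r < best[0]):
--             best = (r, name)
--     return best[1] if best else None
-- ===== Notes on version B (the rewrite author's own statement) =====
-- stated objective: alternative
-- what changed: Replaced A's staged selection (eight candidate membership probes, then a .py filter pass, then a .js filter pass) by a rank/argmin algorithm: every key is mapped to a totally ordered rank (candidate index, then .py by position, then .js by position) and a single pass keeps the minimum-ranked key.
import Mathlib
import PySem

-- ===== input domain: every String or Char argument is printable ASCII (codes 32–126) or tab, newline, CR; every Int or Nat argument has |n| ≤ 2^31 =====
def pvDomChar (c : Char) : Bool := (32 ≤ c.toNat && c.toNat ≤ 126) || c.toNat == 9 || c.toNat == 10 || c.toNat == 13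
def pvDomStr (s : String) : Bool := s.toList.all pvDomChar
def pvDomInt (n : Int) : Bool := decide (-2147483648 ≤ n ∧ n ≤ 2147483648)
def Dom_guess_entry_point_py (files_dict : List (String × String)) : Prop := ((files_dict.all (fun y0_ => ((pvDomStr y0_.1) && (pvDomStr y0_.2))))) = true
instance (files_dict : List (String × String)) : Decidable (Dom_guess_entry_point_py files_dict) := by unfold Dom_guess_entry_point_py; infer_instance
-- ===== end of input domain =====

-- B replaces A's staged scans (candidate probes, then a .py filter, then a .js filter) by an
-- argmin: every key is mapped to a totally ordered rank and one pass keeps the best ranked key;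
-- objective: alternative algorithm (rank/argmin instead of staged selection).

-- ===== PORT A =====
def guess_entry_point_py (files_dict : List (String × String)) : Option String :=
  match (["main.py", "app.py", "server.py", "index.py",
          "index.js", "app.js", "server.js", "index.ts"]).find?
          (fun c => (files_dict.map Prod.fst).contains c) with
  | some c => some c
  | none =>
    match (files_dict.map Prod.fst).filter (fun f => PySem.Str.endswith f ".py") with
    | f :: _ => some f
    | [] =>
      match (files_dict.map Prod.fst).filter (fun f => PySem.Str.endswith f ".js") with
      | f :: _ => some f
      | [] => none

-- ===== PORT B =====
def pvCand : List String :=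
  ["main.py", "app.py", "server.py", "index.py",
   "index.js", "app.js", "server.js", "index.ts"]

-- Python _rank(pos, name): the candidate index is guarded by the membership test,
-- so .index always succeeds there; getD 0 is the value of that successful .index call.
def pvRank? (pos : Int) (name : String) : Option (Int × Int) :=
  if pvCand.contains name then
    some (0, (((PySem.List.index? pvCand name).getD 0 : Nat) : Int))
  else if PySem.Str.endswith name ".py" then
    some (1, pos)
  else if PySem.Str.endswith name ".js" then
    some (2, pos)
  else
    none

-- Python's `<` on int pairs (lexicographic)
def pvLt (a b : Int × Int) : Bool := a.1 < b.1 || (a.1 == b.1 && a.2 < b.2)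

-- one iteration of B's loop: keep the best (rank, name) seen so far
def pvStep (best : Option ((Int × Int) × String)) (e : Int × String) :
    Option ((Int × Int) × String) :=
  match pvRank? e.1 e.2 with
  | none => best
  | some r =>
    match best with
    | none => some (r, e.2)
    | some b => if pvLt r b.1 then some (r, e.2) else best

def guess_entry_point_py_alt (files_dict : List (String × String)) : Option String :=
  match (PySem.List.enumerate (files_dict.map Prod.fst)).foldl pvStep none with
  | some b => some b.2
  | none => none

-- ===== PRECONDITION & SPEC =====
def Spec_guess_entry_point_py (files_dict : List (String × String)) (out : Option String) : Prop := out = guess_entry_point_py_alt files_dict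
instance (files_dict : List (String × String)) (out : Option String) : Decidable (Spec_guess_entry_point_py files_dict out) := by unfold Spec_guess_entry_point_py; infer_instance

-- ===== CLAIM (what is proved, stated in full; the proofs are below) =====
def Claim_equal_guess_entry_point_py : Prop := ∀ (files_dict : List (String × String)), Dom_guess_entry_point_py files_dict → Spec_guess_entry_point_py files_dict (guess_entry_point_py files_dict)

-- ===== LEMMAS AND PROOFS =====

-- left-biased minimum of two optional (rank, name) entries
def pvBmin (a b : Option ((Int × Int) × String)) : Option ((Int × Int) × String) :=
  match a, b with
  | none, b => b
  | a, none => a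
  | some x, some y => if pvLt y.1 x.1 then some y else some x

-- reference recursion: minimum entry of ks enumerated from position n
def pvF (n : Int) (ks : List String) : Option ((Int × Int) × String) :=
  match ks with
  | [] => none
  | k :: t => pvBmin ((pvRank? n k).map (fun r => (r, k))) (pvF (n + 1) t)

theorem pvLt_iff (a b : Int × Int) :
    pvLt a b = true ↔ (a.1 < b.1 ∨ (a.1 = b.1 ∧ a.2 < b.2)) := by
  simp [pvLt]

theorem pvStep_eq (acc : Option ((Int × Int) × String)) (e : Int × String) :
    pvStep acc e = pvBmin acc ((pvRank? e.1 e.2).map (fun r => (r, e.2))) := by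
  unfold pvStep pvBmin
  cases pvRank? e.1 e.2 <;> cases acc <;> simp

theorem pvBmin_none_right (a : Option ((Int × Int) × String)) : pvBmin a none = a := by
  cases a <;> rfl

theorem pvLt_false_iff (a b : Int × Int) :
    pvLt a b = false ↔ ¬(a.1 < b.1 ∨ (a.1 = b.1 ∧ a.2 < b.2)) := by
  rw [Bool.eq_false_iff, Ne, pvLt_iff]

theorem pvBmin_left (x y : (Int × Int) × String) (h : pvLt y.1 x.1 = false) :
    pvBmin (some x) (some y) = some x := by
  simp [pvBmin, h]

theorem pvBmin_right (x y : (Int × Int) × String) (h : pvLt y.1 x.1 = true) :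
    pvBmin (some x) (some y) = some y := by
  simp [pvBmin, h]

theorem pvBmin_assoc (a b c : Option ((Int × Int) × String)) :
    pvBmin (pvBmin a b) c = pvBmin a (pvBmin b c) := by
  cases a with
  | none => rfl
  | some x =>
    cases b with
    | none => rw [pvBmin_none_right]; rfl
    | some y =>
      cases c with
      | none => rw [pvBmin_none_right, pvBmin_none_right]
      | some z =>
        simp only [pvBmin]
        split_ifs <;> simp only [pvBmin] <;> split_ifs <;>
          first
          | rfl
          | (exfalso
             simp only [pvLt_iff, not_or, not_and, not_lt] at *
             omega)

theorem pvFoldl_eq_pvF (ks : List String) (n : Int) (acc : Option ((Int × Int) × String)) :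
    (PySem.List.enumerate ks n).foldl pvStep acc = pvBmin acc (pvF n ks) := by
  induction ks generalizing n acc with
  | nil => cases acc <;> simp [pvF, pvBmin, PySem.List.enumerate_nil]
  | cons k t ih =>
    rw [PySem.List.enumerate_cons, List.foldl_cons, ih, pvStep_eq, pvF, pvBmin_assoc]

theorem pvFind?_congr {α : Type} (l : List α) (p q : α → Bool)
    (h : ∀ x ∈ l, p x = q x) : l.find? p = l.find? q := by
  induction l with
  | nil => rfl
  | cons a t ih =>
    simp only [List.find?_cons, h a (by simp)]
    split <;> [rfl; exact ih fun x hx => h x (by simp [hx])]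

-- find? over an "equals k, or q" predicate = the earlier of k and the first q-element
theorem pvFind?_or_eqKey (l : List String) (k : String) (q : String → Bool) (hk : k ∈ l) :
    l.find? (fun c => (c == k) || q c) =
      match l.find? q with
      | none => some k
      | some b =>
        if (PySem.List.index? l k).getD 0 ≤ (PySem.List.index? l b).getD 0
        then some k else some b := by
  induction l with
  | nil => cases hk
  | cons x t ih =>
    rcases eq_or_ne x k with hx | hx
    · subst hx
      have hk0 : (PySem.List.index? (x :: t) x).getD 0 = 0 := by
        rw [PySem.List.index?_cons_self]; rfl
      rw [List.find?_cons_of_pos (by simp)]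
      cases hf : (x :: t).find? q with
      | none => rfl
      | some b =>
        show some x = if (PySem.List.index? (x :: t) x).getD 0 ≤ (PySem.List.index? (x :: t) b).getD 0
          then some x else some b
        rw [hk0, if_pos (Nat.zero_le _)]
    · have hkt : k ∈ t := (List.mem_cons.mp hk).resolve_left (fun h => hx h.symm)
      obtain ⟨ik, hik⟩ := Option.isSome_iff_exists.mp ((PySem.List.index?_isSome_iff t k).mpr hkt)
      have hk1 : (PySem.List.index? (x :: t) k).getD 0 = ik + 1 := by
        rw [PySem.List.index?_cons_of_ne t hx, hik]; rfl
      by_cases hq : q x = true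
      · rw [List.find?_cons_of_pos (by simp [hq]), List.find?_cons_of_pos hq]
        have hx0 : (PySem.List.index? (x :: t) x).getD 0 = 0 := by
          rw [PySem.List.index?_cons_self]; rfl
        show some x = if (PySem.List.index? (x :: t) k).getD 0 ≤ (PySem.List.index? (x :: t) x).getD 0
          then some k else some x
        rw [hk1, hx0, if_neg (by omega)]
      · have hqf : q x = false := by simpa using hq
        have hxkb : (x == k) = false := beq_eq_false_iff_ne.mpr hx
        rw [List.find?_cons_of_neg (by simp [hqf, hxkb]), List.find?_cons_of_neg (by simp [hqf]),
            ih hkt]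
        cases hf : t.find? q with
        | none => rfl
        | some b =>
          have hbq : q b = true := List.find?_some hf
          have hbt : b ∈ t := List.mem_of_find?_eq_some hf
          have hbx : x ≠ b := fun h => by rw [h, hbq] at hqf; exact Bool.noConfusion hqf
          obtain ⟨ib, hib⟩ := Option.isSome_iff_exists.mp ((PySem.List.index?_isSome_iff t b).mpr hbt)
          have hb1 : (PySem.List.index? (x :: t) b).getD 0 = ib + 1 := by
            rw [PySem.List.index?_cons_of_ne t hbx, hib]; rfl
          show (if (PySem.List.index? t k).getD 0 ≤ (PySem.List.index? t b).getD 0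
                then some k else some b)
             = (if (PySem.List.index? (x :: t) k).getD 0 ≤ (PySem.List.index? (x :: t) b).getD 0
                then some k else some b)
          rw [hik, hib, Option.getD_some, Option.getD_some, hk1, hb1]
          by_cases hle : ik ≤ ib
          · rw [if_pos hle, if_pos (by omega)]
          · rw [if_neg hle, if_neg (by omega)]

-- full characterization of the reference recursion
theorem pvF_char (ks : List String) (n : Int) :
    (match pvCand.find? (fun c => ks.contains c) with
     | some c => pvF n ks = some ((0, (((PySem.List.index? pvCand c).getD 0 : Nat) : Int)), c)
     | none =>
       match (ks.filter (fun f => PySem.Str.endswith f ".py")).head? with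
       | some f => ∃ p : Int, n ≤ p ∧ pvF n ks = some ((1, p), f)
       | none =>
         match (ks.filter (fun f => PySem.Str.endswith f ".js")).head? with
         | some f => ∃ p : Int, n ≤ p ∧ pvF n ks = some ((2, p), f)
         | none => pvF n ks = none) := by
  induction ks generalizing n with
  | nil =>
    have h : pvCand.find? (fun c => ([] : List String).contains c) = none := by
      rw [List.find?_eq_none]; intro a _; simp
    rw [h]; simp [pvF]
  | cons k t ih =>
    have hcontains : (fun c => (k :: t).contains c) = fun c => (c == k) || t.contains c := by
      funext c
      simp only [List.contains_cons]
    by_cases hk : k ∈ pvCand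
    · -- k is a candidate: its rank is (0, index of k)
      have hrank : pvRank? n k =
          some (0, (((PySem.List.index? pvCand k).getD 0 : Nat) : Int)) := by
        simp [pvRank?, hk]
      rw [hcontains, pvFind?_or_eqKey pvCand k _ hk]
      have ihn := ih (n + 1)
      cases hf : pvCand.find? (fun c => t.contains c) with
      | some c' =>
        simp only [hf] at ihn ⊢
        obtain ⟨ik, hik⟩ := (PySem.List.index?_isSome_iff pvCand k).mpr hk |> Option.isSome_iff_exists.mp
        have hc' : c' ∈ pvCand := List.mem_of_find?_eq_some hf
        obtain ⟨ic, hic⟩ := (PySem.List.index?_isSome_iff pvCand c').mpr hc' |> Option.isSome_iff_exists.mp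
        simp only [pvF, hrank, ihn, hik, hic, Option.getD_some, Option.map_some]
        by_cases hle : ik ≤ ic
        · rw [if_pos hle,
              pvBmin_left _ _ ((pvLt_false_iff _ _).mpr (by push_cast; simp; omega))]
          show some ((0, ((ik : Nat) : Int)), k)
              = some ((0, (((PySem.List.index? pvCand k).getD 0 : Nat) : Int)), k)
          rw [hik, Option.getD_some]
        · rw [if_neg hle,
              pvBmin_right _ _ ((pvLt_iff _ _).mpr (by push_cast; simp; omega))]
          show some ((0, ((ic : Nat) : Int)), c')
              = some ((0, (((PySem.List.index? pvCand c').getD 0 : Nat) : Int)), c')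
          rw [hic, Option.getD_some]
      | none =>
        simp only [hf] at ihn ⊢
        -- goal: pvF n (k :: t) = the k entry; the tail minimum has tier ≥ 1
        simp only [pvF, hrank, Option.map_some]
        cases hp : (t.filter (fun f => PySem.Str.endswith f ".py")).head? with
        | some f =>
          simp only [hp] at ihn
          obtain ⟨p, _, hFt⟩ := ihn
          rw [hFt]; simp [pvBmin, pvLt_iff]
        | none =>
          simp only [hp] at ihn
          cases hj : (t.filter (fun f => PySem.Str.endswith f ".js")).head? with
          | some f =>
            simp only [hj] at ihn
            obtain ⟨p, _, hFt⟩ := ihn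
            rw [hFt]; simp [pvBmin, pvLt_iff]
          | none =>
            simp only [hj] at ihn
            rw [ihn]; simp [pvBmin]
    · -- k is not a candidate
      have hfind : pvCand.find? (fun c => (k :: t).contains c)
          = pvCand.find? (fun c => t.contains c) := by
        rw [hcontains]
        apply pvFind?_congr
        intro c hc
        have : (c == k) = false := beq_eq_false_iff_ne.mpr (fun h => hk (h ▸ hc))
        simp [this]
      have hkc : pvCand.contains k = false := by simp [hk]
      rw [hfind]
      have ihn := ih (n + 1)
      cases hf : pvCand.find? (fun c => t.contains c) with
      | some c' =>
        simp only [hf] at ihn ⊢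
        simp only [pvF, ihn, pvRank?, hkc, Bool.false_eq_true, if_false]
        split_ifs <;> simp [pvBmin, pvLt_iff]
      | none =>
        simp only [hf] at ihn ⊢
        by_cases hpy : PySem.Str.endswith k ".py"
        · -- k itself is the first .py file
          simp only [pvF, pvRank?, hkc, Bool.false_eq_true, if_false, hpy, if_true,
            Option.map_some, List.filter_cons, hpy, List.head?_cons]
          cases hp : (t.filter (fun f => PySem.Str.endswith f ".py")).head? with
          | some f =>
            simp only [hp] at ihn
            obtain ⟨p, hpge, hFt⟩ := ihn
            refine ⟨n, le_refl n, ?_⟩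
            rw [hFt]; simp only [pvBmin]
            rw [if_neg (by rw [pvLt_iff]; simp; omega)]
          | none =>
            simp only [hp] at ihn
            cases hj : (t.filter (fun f => PySem.Str.endswith f ".js")).head? with
            | some f =>
              simp only [hj] at ihn
              obtain ⟨p, hpge, hFt⟩ := ihn
              refine ⟨n, le_refl n, ?_⟩
              rw [hFt]; simp only [pvBmin]
              rw [if_neg (by rw [pvLt_iff]; simp)]
            | none =>
              simp only [hj] at ihn
              rw [ihn]; exact ⟨n, le_refl n, by simp [pvBmin]⟩
        · by_cases hjs : PySem.Str.endswith k ".js"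
          · -- k ends with .js
            simp only [pvF, pvRank?, hkc, Bool.false_eq_true, if_false, hpy, if_false,
              hjs, if_true, Option.map_some, List.filter_cons, hpy, hjs]
            cases hp : (t.filter (fun f => PySem.Str.endswith f ".py")).head? with
            | some f =>
              simp only [hp] at ihn ⊢
              obtain ⟨p, hpge, hFt⟩ := ihn
              refine ⟨p, by omega, ?_⟩
              rw [hFt]; simp only [pvBmin]
              rw [if_pos (by rw [pvLt_iff]; simp)]
            | none =>
              simp only [hp] at ihn ⊢
              simp only [List.head?_cons]
              cases hj : (t.filter (fun f => PySem.Str.endswith f ".js")).head? with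
              | some f =>
                simp only [hj] at ihn
                obtain ⟨p, hpge, hFt⟩ := ihn
                refine ⟨n, le_refl n, ?_⟩
                rw [hFt]; simp only [pvBmin]
                rw [if_neg (by rw [pvLt_iff]; simp; omega)]
              | none =>
                simp only [hj] at ihn
                rw [ihn]; exact ⟨n, le_refl n, by simp [pvBmin]⟩
          · -- k is irrelevant
            simp only [pvF, pvRank?, hkc, Bool.false_eq_true, if_false, hpy, hjs,
              Option.map_none, List.filter_cons, hpy, hjs]
            have hnone : pvBmin none (pvF (n + 1) t) = pvF (n + 1) t := by simp [pvBmin]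
            cases hp : (t.filter (fun f => PySem.Str.endswith f ".py")).head? with
            | some f =>
              simp only [hp] at ihn ⊢
              obtain ⟨p, hpge, hFt⟩ := ihn
              exact ⟨p, by omega, by rw [hnone, hFt]⟩
            | none =>
              simp only [hp] at ihn ⊢
              cases hj : (t.filter (fun f => PySem.Str.endswith f ".js")).head? with
              | some f =>
                simp only [hj] at ihn ⊢
                obtain ⟨p, hpge, hFt⟩ := ihn
                exact ⟨p, by omega, by rw [hnone, hFt]⟩
              | none =>
                simp only [hj] at ihn ⊢
                rw [hnone, ihn]

-- ===== VERDICT (by name: the statement is the Claim_ definition above) =====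
theorem guess_entry_point_py_spec : Claim_equal_guess_entry_point_py := by
  intro fd _
  unfold Spec_guess_entry_point_py guess_entry_point_py guess_entry_point_py_alt
  rw [show (PySem.List.enumerate (fd.map Prod.fst)) = PySem.List.enumerate (fd.map Prod.fst) 0 from rfl,
      pvFoldl_eq_pvF]
  have hchar := pvF_char (fd.map Prod.fst) 0
  cases hf : pvCand.find? (fun c => (fd.map Prod.fst).contains c) with
  | some c =>
    simp only [hf] at hchar
    rw [show (["main.py", "app.py", "server.py", "index.py", "index.js", "app.js",
        "server.js", "index.ts"] : List String) = pvCand from rfl, hf, hchar]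
    simp [pvBmin]
  | none =>
    simp only [hf] at hchar
    rw [show (["main.py", "app.py", "server.py", "index.py", "index.js", "app.js",
        "server.js", "index.ts"] : List String) = pvCand from rfl, hf]
    cases hp : ((fd.map Prod.fst).filter (fun f => PySem.Str.endswith f ".py")) with
    | cons f t =>
      simp only [hp, List.head?_cons] at hchar
      obtain ⟨p, _, hF⟩ := hchar
      rw [hF]; simp [pvBmin]
    | nil =>
      simp only [hp, List.head?_nil] at hchar
      cases hj : ((fd.map Prod.fst).filter (fun f => PySem.Str.endswith f ".js")) with
      | cons f t =>
        simp only [hj, List.head?_cons] at hchar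
        obtain ⟨p, _, hF⟩ := hchar
        rw [hF]; simp [pvBmin]
      | nil =>
        simp only [hj, List.head?_nil] at hchar
        rw [hchar]; simp [pvBmin]
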